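-- pv_equiv track=rewrite | github.com/stepanmracek/translatorCompareTools | compareCommon.py | createKeysDict
-- ===== SOURCE A (Python) =====
-- def isInt(val):
-- 	try:
-- 		int(val)
-- 		return True
-- 	except ValueError:
-- 		return False
--
-- def createKeysDict(keys):
-- 	allKeysOK = True
-- 	for k in keys:
-- 		if not '-' in k:
-- 			allKeysOK = False
-- 			break
-- 		if not isInt(k[k.rfind('-'):]):
-- 			allKeysOK = False
-- 			break
--
-- 	if not allKeysOK:
-- 		return dict(zip(keys,keys))
--
-- 	newKeys = [s[:s.rfind('-')+1] + '{:05}'.format(int(s[s.rfind('-')+1:])) for s in keys]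
-- 	return dict(zip(newKeys, keys))
-- ===== SOURCE B (Python) =====
-- def createKeysDict(keys):
-- 	def normalize(s):
-- 		if '-' not in s:
-- 			raise ValueError(s)
-- 		idx = s.rfind('-')
-- 		int(s[idx:])  # ValueError if the dash-inclusive suffix is not an integer
-- 		return s[:idx + 1] + '{:05}'.format(int(s[idx + 1:]))
-- 	try:
-- 		newKeys = [normalize(s) for s in keys]
-- 	except ValueError:
-- 		return dict(zip(keys, keys))
-- 	return dict(zip(newKeys, keys))
-- ===== Notes on version B (the rewrite author's own statement) =====
-- stated objective: idiomatic
-- what changed: A validates all keys in a separate loop (with break) and then transforms them in a second comprehension pass; B uses one per-key normalize helper that signals failure by raising, building the new keys in a single exception-driven pass.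
import Mathlib
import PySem

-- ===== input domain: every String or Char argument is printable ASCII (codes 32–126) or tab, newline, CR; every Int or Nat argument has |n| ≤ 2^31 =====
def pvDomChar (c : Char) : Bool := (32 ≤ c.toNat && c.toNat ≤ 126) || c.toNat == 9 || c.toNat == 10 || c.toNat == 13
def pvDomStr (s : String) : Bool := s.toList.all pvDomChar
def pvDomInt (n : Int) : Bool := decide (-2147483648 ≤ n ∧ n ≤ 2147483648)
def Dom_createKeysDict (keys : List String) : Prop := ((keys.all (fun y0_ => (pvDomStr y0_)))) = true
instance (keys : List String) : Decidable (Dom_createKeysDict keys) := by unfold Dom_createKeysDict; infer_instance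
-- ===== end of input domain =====

-- B replaces A's validate-all-loop-then-transform-comprehension with a single exception-driven
-- pass (one per-key normalize helper); same cost, more idiomatic decomposition.


-- ===== PORT A =====
def isInt (val : String) : Bool :=
  (PySem.Int.ofStr? val).isSome

-- A's validation loop, with the break ported as stopping the recursion
def createKeysDictLoop : List String → Bool
  | [] => true
  | k :: rest =>
    if !(PySem.Str.isIn "-" k) then false
    else if !(isInt (PySem.Str.slice k (some (PySem.Str.rfind k "-")) none)) then false
    else createKeysDictLoop rest

def createKeysDict (keys : List String) : List (String × String) :=
  let allKeysOK := createKeysDictLoop keys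
  if !allKeysOK then
    (PySem.Dict.ofList (keys.zip keys)).items
  else
    -- int(s[s.rfind('-')+1:]) cannot raise here (validation passed): getD 0 is unreachable
    let newKeys := keys.map (fun s =>
      PySem.Str.slice s none (some (PySem.Str.rfind s "-" + 1)) ++
      PySem.Str.zfill (PySem.Int.toStr
        ((PySem.Int.ofStr? (PySem.Str.slice s (some (PySem.Str.rfind s "-" + 1)) none)).getD 0)) 5)
    (PySem.Dict.ofList (newKeys.zip keys)).items

-- ===== PORT B =====
-- per-key helper: none = the ValueError B raises (caught in createKeysDict_alt)
def normalize? (s : String) : Option String :=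
  if !(PySem.Str.isIn "-" s) then none
  else
    let idx := PySem.Str.rfind s "-"
    match PySem.Int.ofStr? (PySem.Str.slice s (some idx) none) with
    | none => none
    | some _ =>
      -- int(s[idx+1:]) cannot raise once int(s[idx:]) parsed: getD 0 is unreachable
      some (PySem.Str.slice s none (some (idx + 1)) ++
        PySem.Str.zfill (PySem.Int.toStr
          ((PySem.Int.ofStr? (PySem.Str.slice s (some (idx + 1)) none)).getD 0)) 5)

def createKeysDict_alt (keys : List String) : List (String × String) :=
  match keys.mapM normalize? with
  | some newKeys => (PySem.Dict.ofList (newKeys.zip keys)).items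
  | none => (PySem.Dict.ofList (keys.zip keys)).items

-- ===== PRECONDITION & SPEC =====
def Spec_createKeysDict (keys : List String) (out : List (String × String)) : Prop := out = createKeysDict_alt keys
instance (keys : List String) (out : List (String × String)) : Decidable (Spec_createKeysDict keys out) := by unfold Spec_createKeysDict; infer_instance

-- ===== CLAIM (what is proved, stated in full; the proofs are below) =====
def Claim_equal_createKeysDict : Prop := ∀ (keys : List String), Dom_createKeysDict keys → Spec_createKeysDict keys (createKeysDict keys)

-- ===== LEMMAS AND PROOFS =====

-- A's per-key transform, named for the proofs
def pvTransform (s : String) : String :=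
  PySem.Str.slice s none (some (PySem.Str.rfind s "-" + 1)) ++
  PySem.Str.zfill (PySem.Int.toStr
    ((PySem.Int.ofStr? (PySem.Str.slice s (some (PySem.Str.rfind s "-" + 1)) none)).getD 0)) 5

-- A's per-key check, named for the proofs
def pvCheck (s : String) : Bool :=
  PySem.Str.isIn "-" s && isInt (PySem.Str.slice s (some (PySem.Str.rfind s "-")) none)

lemma normalize?_eq (s : String) :
    normalize? s = if pvCheck s = true then some (pvTransform s) else none := by
  unfold normalize? pvTransform pvCheck isInt
  cases h1 : PySem.Str.isIn "-" s
  · rfl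
  · simp only [Bool.not_true, Bool.true_and]
    cases hp : PySem.Int.ofStr? (PySem.Str.slice s (some (PySem.Str.rfind s "-")) none)
    · rfl
    · rfl

lemma loop_cons (k : String) (rest : List String) :
    createKeysDictLoop (k :: rest) = (pvCheck k && createKeysDictLoop rest) := by
  conv_lhs => rw [createKeysDictLoop]
  unfold pvCheck isInt
  cases h1 : PySem.Str.isIn "-" k
  · rfl
  · cases hp : (PySem.Int.ofStr? (PySem.Str.slice k (some (PySem.Str.rfind k "-")) none)).isSome
    · rfl
    · rfl

lemma mapM_normalize?_eq (keys : List String) :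
    keys.mapM normalize? =
      if createKeysDictLoop keys = true then some (keys.map pvTransform) else none := by
  induction keys with
  | nil => rfl
  | cons k rest ih =>
    rw [List.mapM_cons, normalize?_eq, loop_cons, ih]
    cases hc : pvCheck k
    · rfl
    · simp only [Bool.true_and, if_true]
      cases h3 : createKeysDictLoop rest
      · rfl
      · rfl

-- ===== VERDICT (by name: the statement is the Claim_ definition above) =====
theorem createKeysDict_spec : Claim_equal_createKeysDict := by
  intro keys _
  unfold Spec_createKeysDict createKeysDict createKeysDict_alt
  rw [mapM_normalize?_eq]
  cases h : createKeysDictLoop keys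
  · rfl
  · rfl
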